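-- pv_equiv track=rewrite | github.com/anonymousauthorname/ProjectGRID | eval/ultimate_eval_core.py | iter_array_start_positions
-- ===== SOURCE A (Python) =====
-- from typing import List, Dict, Any, Optional, Tuple, Iterator
--
-- def iter_array_start_positions(text: str) -> Iterator[int]:
--     in_string = False
--     escape = False
--     for idx, ch in enumerate(text):
--         if in_string:
--             if escape:
--                 escape = False
--             elif ch == "\\":
--                 escape = True
--             elif ch == '"':
--                 in_string = False
--             continue
--         if ch == '"':
--             in_string = True
--             continue
--         if ch == "[":
--             yield idx
-- ===== SOURCE B (Python) =====
-- def _trailing_backslashes(piece):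
--     k = 0
--     for ch in reversed(piece):
--         if ch == '\\':
--             k += 1
--         else:
--             break
--     return k
--
-- def iter_array_start_positions(text):
--     offset = 0
--     in_string = False
--     for piece in text.split('"'):
--         if in_string:
--             in_string = _trailing_backslashes(piece) % 2 == 1
--         else:
--             yield from (offset + j for j, ch in enumerate(piece) if ch == '[')
--             in_string = True
--         offset += len(piece) + 1
-- ===== Notes on version B (the rewrite author's own statement) =====
-- stated objective: alternative
-- what changed: Instead of a per-character state machine with in_string/escape flags, B splits the text once on the double-quote character into quote-delimited segments, emits bracket positions from segments lying outside strings, and decides whether each closing quote is escaped by the parity of its segment's trailing backslash run.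
import Mathlib
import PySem

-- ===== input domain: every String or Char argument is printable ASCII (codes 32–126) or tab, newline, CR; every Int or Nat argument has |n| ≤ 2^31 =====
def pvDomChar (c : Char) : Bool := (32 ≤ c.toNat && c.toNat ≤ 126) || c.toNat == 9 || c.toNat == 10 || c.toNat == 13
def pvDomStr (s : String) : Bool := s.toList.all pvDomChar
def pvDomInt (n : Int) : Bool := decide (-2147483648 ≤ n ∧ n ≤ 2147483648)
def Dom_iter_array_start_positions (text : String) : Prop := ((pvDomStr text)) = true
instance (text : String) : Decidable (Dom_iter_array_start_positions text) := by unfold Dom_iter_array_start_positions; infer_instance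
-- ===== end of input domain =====

-- B replaces A's per-character in_string/escape state machine by a one-shot split on '"'
-- with per-segment trailing-backslash-run parity (objective: alternative algorithm, same cost).

-- ===== PORT A =====
-- A's for loop over enumerate(text) with state (in_string, escape); yields collected in order.
def goA : List Char → Int → Bool → Bool → List Int
  | [], _, _, _ => []
  | ch :: rest, idx, in_string, escape =>
    if in_string then
      if escape then goA rest (idx + 1) true false
      else if ch = '\\' then goA rest (idx + 1) true true
      else if ch = '"' then goA rest (idx + 1) false false
      else goA rest (idx + 1) true false
    else if ch = '"' then goA rest (idx + 1) true false
    else if ch = '[' then idx :: goA rest (idx + 1) false false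
    else goA rest (idx + 1) false false

def iter_array_start_positions (text : String) : List Int :=
  goA text.toList 0 false false

-- ===== PORT B =====
-- port of _trailing_backslashes: the for loop over reversed(piece) counting leading '\\'
def tbB : List Char → Nat
  | [] => 0
  | c :: r => if c = '\\' then tbB r + 1 else 0

-- B's for loop over text.split('"') with state (offset, in_string)
def goB : List (List Char) → Int → Bool → List Int
  | [], _, _ => []
  | piece :: rest, offset, in_string =>
    if in_string then
      goB rest (offset + piece.length + 1) (tbB piece.reverse % 2 == 1)
    else
      (PySem.List.enumerate piece).filterMap
        (fun jc => if jc.2 = '[' then some (offset + jc.1) else none)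
      ++ goB rest (offset + piece.length + 1) true

def iter_array_start_positions_alt (text : String) : List Int :=
  goB (PySem.Chars.splitOn text.toList ['"']) 0 false

-- ===== PRECONDITION & SPEC =====
def Spec_iter_array_start_positions (text : String) (out : List Int) : Prop := out = iter_array_start_positions_alt text
instance (text : String) (out : List Int) : Decidable (Spec_iter_array_start_positions text out) := by unfold Spec_iter_array_start_positions; infer_instance

-- ===== CLAIM (what is proved, stated in full; the proofs are below) =====
def Claim_equal_iter_array_start_positions : Prop := ∀ (text : String), Dom_iter_array_start_positions text → Spec_iter_array_start_positions text (iter_array_start_positions text)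

-- ===== LEMMAS AND PROOFS =====

-- structural version of splitting on '"'
def sp : List Char → List (List Char)
  | [] => [[]]
  | c :: r => if c = '"' then [] :: sp r else (sp r).modifyHead (c :: ·)

theorem sp_ne_nil (l : List Char) : sp l ≠ [] := by
  cases l with
  | nil => simp [sp]
  | cons c r =>
    simp only [sp]
    split_ifs
    · simp
    · cases h : sp r with
      | nil => exact absurd h (sp_ne_nil r)
      | cons a t => simp

theorem go_spec : ∀ (fuel : ℕ) (l cur : List Char) (acc : List (List Char)),
    l.length ≤ fuel →
    PySem.Chars.splitOn.go ['"'] fuel l cur acc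
      = acc.reverse ++ (sp l).modifyHead (cur.reverse ++ ·) := by
  intro fuel
  induction fuel with
  | zero =>
      intro l cur acc hl
      have : l = [] := List.eq_nil_of_length_eq_zero (Nat.le_zero.mp hl)
      subst this
      rw [PySem.Chars.splitOn.go.eq_def]
      simp [sp]
  | succ n ih =>
      intro l cur acc hl
      cases l with
      | nil =>
          rw [PySem.Chars.splitOn.go.eq_def]
          simp [sp]
      | cons c rest =>
          have hr : rest.length ≤ n := by simpa using Nat.succ_le_succ_iff.mp hl
          rw [PySem.Chars.splitOn.go.eq_def]
          by_cases hc : c = '"'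
          · subst hc
            have hpre : List.isPrefixOf ['"'] ('"' :: rest) = true := by
              simp [List.isPrefixOf]
            simp only [hpre, if_true]
            rw [show List.drop (List.length ['"']) ('"' :: rest) = rest by simp,
              ih rest [] _ hr]
            cases hsp : sp rest with
            | nil => exact absurd hsp (sp_ne_nil rest)
            | cons a t => simp [sp, hsp]
          · have hpre : List.isPrefixOf ['"'] (c :: rest) = false := by
              simp [List.isPrefixOf]
              exact fun h => absurd h.symm hc
            simp only [hpre, Bool.false_eq_true, if_false, ih rest (c :: cur) acc hr, sp,
              if_neg hc]
            cases h : sp rest with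
            | nil => exact absurd h (sp_ne_nil rest)
            | cons a t => simp

theorem splitOn_eq_sp (l : List Char) : PySem.Chars.splitOn l ['"'] = sp l := by
  unfold PySem.Chars.splitOn
  rw [go_spec (l.length + 1) l [] [] (Nat.le_succ _)]
  cases h : sp l with
  | nil => exact absurd h (sp_ne_nil l)
  | cons a t => simp

-- join the pieces back with '"'
def fl : List (List Char) → List Char
  | [] => []
  | [p] => p
  | p :: ps => p ++ '"' :: fl ps

theorem fl_sp (l : List Char) : fl (sp l) = l := by
  induction l with
  | nil => simp [sp, fl]
  | cons c r ih =>
    by_cases hc : c = '"'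
    · subst hc
      simp only [sp]
      cases h : sp r with
      | nil => exact absurd h (sp_ne_nil r)
      | cons a t =>
        rw [h] at ih
        cases t with
        | nil => simpa [fl] using ih
        | cons b t' => simpa [fl] using ih
    · simp only [sp, if_neg hc]
      cases h : sp r with
      | nil => exact absurd h (sp_ne_nil r)
      | cons a t =>
        rw [h] at ih
        cases t with
        | nil => simpa [fl] using ih
        | cons b t' => simpa [fl] using ih

theorem sp_no_quote (l : List Char) : ∀ p ∈ sp l, '"' ∉ p := by
  induction l with
  | nil => simp [sp]
  | cons c r ih =>
    by_cases hc : c = '"'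
    · subst hc
      intro p hp
      rw [sp, if_pos rfl] at hp
      rcases List.mem_cons.mp hp with hp | hp
      · simp [hp]
      · exact ih p hp
    · intro p hp
      rw [sp, if_neg hc] at hp
      cases h : sp r with
      | nil => exact absurd h (sp_ne_nil r)
      | cons a t =>
        rw [h] at hp
        simp only [List.modifyHead] at hp
        rcases List.mem_cons.mp hp with hp | hp
        · subst hp
          intro hmem
          rcases List.mem_cons.mp hmem with hmem | hmem
          · exact hc hmem.symm
          · exact ih a (h ▸ List.mem_cons_self) hmem
        · exact ih p (h ▸ List.mem_cons_of_mem _ hp)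

-- final escape flag after scanning a quote-free piece inside a string
def escA : List Char → Bool → Bool
  | [], e => e
  | c :: r, e => escA r (if e then false else decide (c = '\\'))

theorem escA_append (ys : List Char) (c : Char) :
    ∀ e, escA (ys ++ [c]) e = (if escA ys e then false else decide (c = '\\')) := by
  induction ys with
  | nil => intro e; simp [escA]
  | cons y r ih => intro e; simp [escA, ih]

theorem tbB_parity (p : List Char) : escA p false = (tbB p.reverse % 2 == 1) := by
  induction p using List.reverseRecOn with
  | nil => simp [escA, tbB]
  | append_singleton ys c ih =>
    rw [escA_append, List.reverse_append]
    by_cases hc : c = '\\'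
    · subst hc
      simp only [List.reverse_singleton, List.singleton_append, tbB]
      rw [ih] at *
      rcases Nat.mod_two_eq_zero_or_one (tbB ys.reverse) with h | h
      · have h1 : (tbB ys.reverse + 1) % 2 = 1 := by omega
        simp [h, h1]
      · have h1 : (tbB ys.reverse + 1) % 2 = 0 := by omega
        simp [h, h1]
    · simp [tbB, hc]

-- scanning a quote-free piece while inside a string just threads the escape flag
theorem inA (p : List Char) (hq : '"' ∉ p) :
    ∀ (rest : List Char) (i : Int) (e : Bool),
      goA (p ++ rest) i true e = goA rest (i + p.length) true (escA p e) := by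
  induction p with
  | nil => intro rest i e; simp [escA]
  | cons c r ih =>
    intro rest i e
    have hc : ¬ c = '"' := fun h => hq (by simp [h])
    have hr : '"' ∉ r := fun h => hq (List.mem_cons_of_mem _ h)
    have hlen : i + 1 + (r.length : Int) = i + ((c :: r).length : Int) := by push_cast [List.length_cons]; omega
    cases e with
    | true =>
      rw [List.cons_append,
        show goA (c :: (r ++ rest)) i true true = goA (r ++ rest) (i + 1) true false from by
          simp [goA],
        ih hr rest (i + 1) false, hlen]
      simp [escA]
    | false =>
      by_cases hbs : c = '\\'
      · subst hbs
        rw [List.cons_append,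
          show goA ('\\' :: (r ++ rest)) i true false = goA (r ++ rest) (i + 1) true true from by
            simp [goA],
          ih hr rest (i + 1) true, hlen]
        simp [escA]
      · rw [List.cons_append,
          show goA (c :: (r ++ rest)) i true false = goA (r ++ rest) (i + 1) true false from by
            simp [goA, hc, hbs],
          ih hr rest (i + 1) false, hlen]
        simp [escA, hbs]

-- scanning a quote-free piece while outside a string emits its '[' positions
theorem outA (p : List Char) (hq : '"' ∉ p) :
    ∀ (rest : List Char) (i s : Int),
      goA (p ++ rest) (i + s) false false
        = (PySem.List.enumerate p s).filterMap
            (fun jc => if jc.2 = '[' then some (i + jc.1) else none)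
          ++ goA rest (i + s + p.length) false false := by
  induction p with
  | nil => intro rest i s; simp [PySem.List.enumerate]
  | cons c r ih =>
    intro rest i s
    have hc : ¬ c = '"' := fun h => hq (by simp [h])
    have hr : '"' ∉ r := fun h => hq (List.mem_cons_of_mem _ h)
    have hlen : i + (s + 1) + (r.length : Int) = i + s + ((c :: r).length : Int) := by
      push_cast [List.length_cons]; omega
    by_cases hb : c = '['
    · subst hb
      rw [List.cons_append,
        show goA ('[' :: (r ++ rest)) (i + s) false false
            = (i + s) :: goA (r ++ rest) (i + s + 1) false false from by simp [goA, hc],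
        show i + s + 1 = i + (s + 1) from by ring,
        ih hr rest i (s + 1), hlen]
      simp [PySem.List.enumerate]
    · rw [List.cons_append,
        show goA (c :: (r ++ rest)) (i + s) false false
            = goA (r ++ rest) (i + s + 1) false false from by simp [goA, hc, hb],
        show i + s + 1 = i + (s + 1) from by ring,
        ih hr rest i (s + 1), hlen]
      simp [PySem.List.enumerate, hb]

-- the two ports agree piece-list-wise, from the outside and from the inside state
theorem main_lemma : ∀ (pieces : List (List Char)), (∀ p ∈ pieces, '"' ∉ p) →
    ∀ i : Int,
      goA (fl pieces) i false false = goB pieces i false ∧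
      goA (fl pieces) i true false = goB pieces i true := by
  intro pieces
  induction pieces with
  | nil => intro _ i; simp [fl, goA, goB]
  | cons p ps ih =>
    intro hnq i
    have hp : '"' ∉ p := hnq p List.mem_cons_self
    have hps : ∀ q ∈ ps, '"' ∉ q := fun q hq => hnq q (List.mem_cons_of_mem _ hq)
    cases ps with
    | nil =>
      constructor
      · have h := outA p hp [] i 0
        simp only [List.append_nil, add_zero] at h
        rw [show fl [p] = p from rfl, h]
        simp [goA, goB]
      · have h := inA p hp [] i false
        simp only [List.append_nil] at h
        rw [show fl [p] = p from rfl, h]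
        simp [goA, goB]
    | cons q qs =>
      have ihq := ih hps
      constructor
      · have hout := outA p hp ('"' :: fl (q :: qs)) i 0
        simp only [add_zero] at hout
        have hfl : fl (p :: q :: qs) = p ++ '"' :: fl (q :: qs) := rfl
        rw [hfl, hout]
        have hquote : goA ('"' :: fl (q :: qs)) (i + p.length) false false
            = goA (fl (q :: qs)) (i + p.length + 1) true false := by simp [goA]
        rw [hquote, (ihq (i + p.length + 1)).2]
        simp [goB]
      · have hin := inA p hp ('"' :: fl (q :: qs)) i false
        have hfl : fl (p :: q :: qs) = p ++ '"' :: fl (q :: qs) := rfl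
        rw [hfl, hin]
        have hBstep : goB (p :: q :: qs) i true
            = goB (q :: qs) (i + p.length + 1) (tbB p.reverse % 2 == 1) := by simp [goB]
        rw [hBstep, ← tbB_parity]
        cases he : escA p false with
        | true =>
          have hquote : goA ('"' :: fl (q :: qs)) (i + p.length) true true
              = goA (fl (q :: qs)) (i + p.length + 1) true false := by simp [goA]
          rw [hquote, (ihq (i + p.length + 1)).2]
        | false =>
          have hquote : goA ('"' :: fl (q :: qs)) (i + p.length) true false
              = goA (fl (q :: qs)) (i + p.length + 1) false false := by simp [goA]
          rw [hquote, (ihq (i + p.length + 1)).1]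

-- ===== VERDICT (by name: the statement is the Claim_ definition above) =====
theorem iter_array_start_positions_spec : Claim_equal_iter_array_start_positions := by
  intro text _
  unfold Spec_iter_array_start_positions iter_array_start_positions iter_array_start_positions_alt
  rw [splitOn_eq_sp]
  have h := (main_lemma (sp text.toList) (sp_no_quote text.toList) 0).1
  rw [fl_sp] at h
  exact h
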